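-- pv_equiv track=rewrite | github.com/anmolojha/wordle-playground | scripts/evaluator.py | _check
-- ===== SOURCE A (Python) =====
-- def _check(target, guess):
--     """Checks if target and guess match and returns appropriate feedback. In feedback, 1 means green, 0 means amber, -1 means gray.
--
--     Args:
--         target (str): target word
--         guess (str): guessed word
--
--     Returns:
--         tuple: `(is_correct, feedback)`
--     """
--     is_correct = False
--     feedback = []
--     # check for character-wise exact match
--     for i, letter in enumerate(guess):
--         if letter == target[i]:
--             feedback.append(1)
--         else:
--             feedback.append(-1)
--
--     if sum(feedback) == len(feedback):
--         is_correct = True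
--     else:
--         matched_target = feedback.copy()
--         # check for non-positional match with unmatched characters in targets
--         for i, letter in enumerate(guess):
--             if feedback[i] == 1:
--                 continue
--             for j, target_letter in enumerate(target):
--                 if matched_target[j] > -1:
--                     continue
--                 if letter == target_letter:
--                     matched_target[j] = 0
--                     feedback[i] = 0
--                     break
--
--     return is_correct, feedback
-- ===== SOURCE B (Python) =====
-- def _check(target, guess):
--     """Single-pass Wordle feedback: greens via zip, ambers via a letter-count table."""
--     feedback = [1 if g == t else -1 for g, t in zip(guess, target)]
--     if all(f == 1 for f in feedback):
--         return True, feedback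
--     counts = {}
--     for t, f in zip(target, feedback):
--         if f != 1:
--             counts[t] = counts.get(t, 0) + 1
--     result = []
--     for g, f in zip(guess, feedback):
--         if f == -1 and counts.get(g, 0) > 0:
--             counts[g] -= 1
--             result.append(0)
--         else:
--             result.append(f)
--     return False, result
-- ===== Notes on version B (the rewrite author's own statement) =====
-- stated objective: faster
-- what changed: Replaces A's nested per-letter rescans of the target for amber matching with a single pass: greens via zip, then the unmatched target letters are counted once into a dict and ambers are assigned left-to-right by decrementing counts.
import Mathlib
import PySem

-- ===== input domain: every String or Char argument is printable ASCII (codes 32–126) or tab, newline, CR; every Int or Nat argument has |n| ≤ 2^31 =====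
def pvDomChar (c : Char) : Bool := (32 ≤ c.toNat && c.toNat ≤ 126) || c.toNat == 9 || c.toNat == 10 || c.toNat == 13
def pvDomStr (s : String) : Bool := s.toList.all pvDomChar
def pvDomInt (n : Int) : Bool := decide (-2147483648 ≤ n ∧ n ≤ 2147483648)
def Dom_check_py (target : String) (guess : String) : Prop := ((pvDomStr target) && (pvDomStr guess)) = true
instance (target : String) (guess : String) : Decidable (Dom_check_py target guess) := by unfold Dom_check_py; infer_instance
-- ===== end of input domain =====

-- B replaces A's quadratic nested amber rescans of the target by a one-pass letter-count table (objective: faster).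

-- ===== PORT A =====
-- inner 'for j, target_letter in enumerate(target)' scan: returns the index j it marks, if any.
-- Python raises IndexError when j is out of range for matched_target; that happens only outside Pre_,
-- where pyGetD's default (0 > -1, i.e. 'continue') is never hit inside Pre_.
def aInner (letter : Char) (mt : List Int) : List (Int × Char) → Option Int
  | [] => none
  | (j, tc) :: rest =>
    if PySem.List.pyGetD mt j 0 > -1 then aInner letter mt rest
    else if letter = tc then some j
    else aInner letter mt rest

-- one iteration of the outer 'for i, letter in enumerate(guess)' loop; state = (matched_target, feedback)
def aStep (tl : List Char) (st : List Int × List Int) (p : Int × Char) : List Int × List Int :=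
  if PySem.List.pyGetD st.2 p.1 0 = 1 then st
  else
    match aInner p.2 st.1 (PySem.List.enumerate tl) with
    | some j => (PySem.List.pySetD st.1 j 0, PySem.List.pySetD st.2 p.1 0)
    | none => st

def check_py (target : String) (guess : String) : Bool × List Int :=
  let tl := target.toList
  let gl := guess.toList
  -- first loop: feedback.append(1 if letter == target[i] else -1); target[i] raising (pyGet? = none) only outside Pre_
  let feedback := (PySem.List.enumerate gl).foldl
    (fun fb p => fb ++ [if PySem.List.pyGet? tl p.1 = some p.2 then (1 : Int) else (-1 : Int)]) []
  if feedback.sum = PySem.List.len feedback then (true, feedback)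
  else
    let st := (PySem.List.enumerate gl).foldl (aStep tl) (feedback, feedback)
    (false, st.2)

-- ===== PORT B =====
-- counts[t] = counts.get(t, 0) + 1 for unmatched target letters
def bCount (d : PySem.Dict Char Int) (p : Char × Int) : PySem.Dict Char Int :=
  if p.2 ≠ 1 then d.insert p.1 (d.getD p.1 0 + 1) else d

-- one iteration of B's result loop; state = (counts, result)
def bStep (st : PySem.Dict Char Int × List Int) (p : Char × Int) : PySem.Dict Char Int × List Int :=
  if p.2 = -1 ∧ st.1.getD p.1 0 > 0 then (st.1.insert p.1 (st.1.getD p.1 0 - 1), st.2 ++ [(0 : Int)])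
  else (st.1, st.2 ++ [p.2])

def check_py_alt (target : String) (guess : String) : Bool × List Int :=
  let tl := target.toList
  let gl := guess.toList
  let feedback := (gl.zip tl).map (fun p => if p.1 = p.2 then (1 : Int) else (-1 : Int))
  if feedback.all (fun f => f == 1) then (true, feedback)
  else
    let counts := (tl.zip feedback).foldl bCount PySem.Dict.empty
    (false, ((gl.zip feedback).foldl bStep (counts, [])).2)

-- ===== PRECONDITION & SPEC =====
-- Pre_ excludes exactly the inputs on which A raises IndexError (it returns everywhere else):
-- guesses longer than the target (target[i] out of range), and strictly shorter guesses for which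
-- some non-green guess letter occurs more often (non-green) in the guess than it occurs non-green
-- in the first len(guess) target positions — there A's inner scan runs off the end of matched_target.
def Pre_check_py (target : String) (guess : String) : Prop :=
  guess.toList.length ≤ target.toList.length ∧
  (guess.toList.length = target.toList.length ∨
    ∀ c ∈ guess.toList,
      (guess.toList.zip target.toList).countP (fun p => p.1 == c && p.1 != p.2) ≤
      (target.toList.zip guess.toList).countP (fun p => p.1 == c && p.1 != p.2))
instance (target : String) (guess : String) : Decidable (Pre_check_py target guess) := by
  unfold Pre_check_py; infer_instance

def pvWitness_check_py : String × String := ("crane", "caner")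

def Spec_check_py (target : String) (guess : String) (out : Bool × List Int) : Prop := out = check_py_alt target guess
instance (target : String) (guess : String) (out : Bool × List Int) : Decidable (Spec_check_py target guess out) := by unfold Spec_check_py; infer_instance

-- ===== CLAIM (what is proved, stated in full; the proofs are below) =====
def Claim_equal_check_py : Prop := ∀ (target : String) (guess : String), Dom_check_py target guess → Pre_check_py target guess → Spec_check_py target guess (check_py target guess)

-- ===== LEMMAS AND PROOFS =====

-- number of target positions still available for an amber match of letter c, given marker list mt
def pvAvail (tl : List Char) (mt : List Int) (c : Char) : Nat :=
  (tl.zip mt).countP (fun p => p.1 == c && decide (p.2 ≤ -1))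

lemma pvEntries (gl tl : List Char) :
    ∀ x ∈ (gl.zip tl).map (fun p => if p.1 = p.2 then (1 : Int) else (-1 : Int)), x = 1 ∨ x = -1 := by
  intro x hx
  rcases List.mem_map.mp hx with ⟨p, _, rfl⟩
  split_ifs <;> simp

lemma pvSumBound (l : List Int) (h : ∀ x ∈ l, x = 1 ∨ x = -1) : l.sum ≤ l.length := by
  induction l with
  | nil => simp
  | cons a t ih =>
    have ha := h a (by simp)
    have ht := ih (fun x hx => h x (by simp [hx]))
    simp only [List.sum_cons, List.length_cons]
    push_cast
    rcases ha with rfl | rfl <;> omega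

lemma pvSumAll (l : List Int) (h : ∀ x ∈ l, x = 1 ∨ x = -1) :
    (l.sum = l.length ↔ l.all (fun f => f == 1) = true) := by
  induction l with
  | nil => simp
  | cons a t ih =>
    have ha := h a (by simp)
    have hb := pvSumBound t (fun x hx => h x (by simp [hx]))
    have ht := ih (fun x hx => h x (by simp [hx]))
    simp only [List.sum_cons, List.length_cons, List.all_cons, Bool.and_eq_true, beq_iff_eq]
    rw [← ht]
    push_cast
    rcases ha with rfl | rfl
    · constructor
      · intro hsum; exact ⟨rfl, by omega⟩
      · intro ⟨_, hsum⟩; omega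
    · constructor
      · intro hsum; omega
      · intro ⟨hc, _⟩; omega

-- A's first loop computes B's zip-map feedback whenever the guess is no longer than the target
lemma pvFb_eq (tl gl : List Char) (h : gl.length ≤ tl.length) :
    (PySem.List.enumerate gl).foldl
      (fun fb p => fb ++ [if PySem.List.pyGet? tl p.1 = some p.2 then (1 : Int) else (-1 : Int)]) []
    = (gl.zip tl).map (fun p => if p.1 = p.2 then (1 : Int) else (-1 : Int)) := by
  rw [PySem.List.foldl_append_singleton_eq_map]
  apply List.ext_getElem
  · simp [List.length_zip]; omega
  · intro k h1 h2
    have hk : k < gl.length := by simpa using h1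
    have hkt : k < tl.length := lt_of_lt_of_le hk h
    simp only [List.nil_append, List.getElem_map, PySem.List.getElem_enumerate, List.getElem_zip]
    have : PySem.List.pyGet? tl ((0 : Int) + k) = some (tl[k]) := by
      have : ((0 : Int) + k) = ((k : Nat) : Int) := by ring
      rw [this, PySem.List.pyGet?_natCast, List.getElem?_eq_getElem hkt]
    rw [this]
    simp only [Option.some.injEq]
    by_cases he : gl[k] = tl[k]
    · rw [if_pos he.symm, if_pos he]
    · rw [if_neg (fun hx => he hx.symm), if_neg he]

lemma pvBfold_acc (l : List (Char × Int)) (d : PySem.Dict Char Int) (a : List Int) :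
    l.foldl bStep (d, a) = ((l.foldl bStep (d, [])).1, a ++ (l.foldl bStep (d, [])).2) := by
  induction l generalizing d a with
  | nil => simp
  | cons p t ih =>
    simp only [List.foldl_cons]
    by_cases hc : p.2 = -1 ∧ d.getD p.1 0 > 0
    · simp only [bStep, if_pos hc, List.nil_append]
      rw [ih _ (a ++ [(0 : Int)]), ih _ [(0 : Int)]]
      simp
    · simp only [bStep, if_neg hc, List.nil_append]
      rw [ih _ (a ++ [p.2]), ih _ [p.2]]
      simp

lemma pvBCount_spec (l : List (Char × Int)) (d : PySem.Dict Char Int) (c : Char) :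
    (l.foldl bCount d).getD c 0 = d.getD c 0 + (l.countP (fun p => (p.2 != 1) && (p.1 == c)) : Int) := by
  induction l generalizing d with
  | nil => simp
  | cons p t ih =>
    simp only [List.foldl_cons, List.countP_cons]
    by_cases h1 : p.2 ≠ 1
    · simp only [bCount, if_pos h1]
      rw [ih]
      rw [PySem.Dict.getD_insert]
      by_cases h2 : p.1 = c
      · rw [if_pos (by rw [h2])]
        have : ((p.2 != 1) && (p.1 == c)) = true := by
          simp [h1, h2]
        rw [this, h2]
        simp
        ring
      · rw [if_neg (fun hx => h2 hx.symm)]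
        have : ((p.2 != 1) && (p.1 == c)) = false := by
          simp [h2]
        rw [this]
        simp
    · simp only [bCount, if_neg h1]
      rw [ih]
      push_neg at h1
      have : ((p.2 != 1) && (p.1 == c)) = false := by simp [h1]
      rw [this]
      simp

lemma pvAInner_none (letter : Char) (ts : List Char) (s : Nat) (mt : List Int)
    (h : aInner letter mt (PySem.List.enumerate ts (s : Int)) = none) :
    ∀ k, (hk : k < ts.length) → ¬(mt.getD (s + k) 0 ≤ -1 ∧ ts[k] = letter) := by
  induction ts generalizing s with
  | nil => intro k hk; simp at hk
  | cons c rest ih =>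
    rw [PySem.List.enumerate_cons] at h
    simp only [aInner, PySem.List.pyGetD_natCast] at h
    have hs1 : (s : Int) + 1 = ((s + 1 : Nat) : Int) := by push_cast; ring
    intro k hk
    by_cases h1 : mt.getD s 0 > -1
    · rw [if_pos h1] at h
      rw [hs1] at h
      match k with
      | 0 => intro ⟨hm, _⟩; rw [Nat.add_zero] at hm; omega
      | k + 1 =>
        have := ih (s + 1) h k (by simpa using hk)
        intro ⟨hm, hc⟩
        exact this ⟨by rw [show s + 1 + k = s + (k + 1) by ring]; exact hm, by simpa using hc⟩
    · rw [if_neg h1] at h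
      by_cases h2 : letter = c
      · rw [if_pos h2] at h; exact absurd h (by simp)
      · rw [if_neg h2] at h
        rw [hs1] at h
        match k with
        | 0 => intro ⟨_, hc⟩; exact h2 (by simpa using hc.symm)
        | k + 1 =>
          have := ih (s + 1) h k (by simpa using hk)
          intro ⟨hm, hc⟩
          exact this ⟨by rw [show s + 1 + k = s + (k + 1) by ring]; exact hm, by simpa using hc⟩

lemma pvAInner_some (letter : Char) (ts : List Char) (s : Nat) (mt : List Int) (j : Int)
    (h : aInner letter mt (PySem.List.enumerate ts (s : Int)) = some j) :
    ∃ k, ∃ (hk : k < ts.length), j = ((s + k : Nat) : Int) ∧ mt.getD (s + k) 0 ≤ -1 ∧ ts[k] = letter := by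
  induction ts generalizing s with
  | nil => simp [PySem.List.enumerate_nil, aInner] at h
  | cons c rest ih =>
    rw [PySem.List.enumerate_cons] at h
    simp only [aInner, PySem.List.pyGetD_natCast] at h
    have hs1 : (s : Int) + 1 = ((s + 1 : Nat) : Int) := by push_cast; ring
    by_cases h1 : mt.getD s 0 > -1
    · rw [if_pos h1, hs1] at h
      obtain ⟨k, hk, hj, hm, hc⟩ := ih (s + 1) h
      exact ⟨k + 1, by simpa using hk, by rw [hj]; push_cast; ring, by rw [show s + (k + 1) = s + 1 + k by ring]; exact hm, by simpa using hc⟩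
    · rw [if_neg h1] at h
      by_cases h2 : letter = c
      · rw [if_pos h2] at h
        refine ⟨0, by simp, ?_, ?_, ?_⟩
        · rw [Nat.add_zero]; exact (Option.some.inj h).symm
        · rw [Nat.add_zero]; omega
        · simp [h2]
      · rw [if_neg h2, hs1] at h
        obtain ⟨k, hk, hj, hm, hc⟩ := ih (s + 1) h
        exact ⟨k + 1, by simpa using hk, by rw [hj]; push_cast; ring, by rw [show s + (k + 1) = s + 1 + k by ring]; exact hm, by simpa using hc⟩

lemma pvGetD_lt (mt : List Int) (k : Nat) (hm : mt.getD k 0 ≤ -1) : k < mt.length := by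
  by_contra hkm
  rw [List.getD_eq_getElem?_getD, List.getElem?_eq_none (by omega)] at hm
  simp at hm

lemma pvAvail_pos (tl : List Char) (mt : List Int) (k : Nat)
    (hk : k < tl.length)
    (hm : mt.getD k 0 ≤ -1) : 0 < pvAvail tl mt (tl[k]) := by
  have hkm : k < mt.length := pvGetD_lt mt k hm
  have hmem : (tl[k], mt[k]) ∈ tl.zip mt := by
    rw [List.mem_iff_getElem]
    exact ⟨k, by simp [List.length_zip]; omega, List.getElem_zip⟩
  have hmk : mt[k] ≤ -1 := by
    rw [List.getD_eq_getElem?_getD, List.getElem?_eq_getElem hkm] at hm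
    simpa using hm
  unfold pvAvail
  by_contra h0
  rw [Nat.not_lt, Nat.le_zero] at h0
  have h0 : (tl.zip mt).countP (fun p => p.1 == tl[k] && decide (p.2 ≤ -1)) = 0 := by omega
  have := List.countP_eq_zero.mp h0 _ hmem
  simp [hmk] at this

lemma pvAvail_set (tl : List Char) (mt : List Int) (k : Nat) (letter c : Char)
    (hk : k < tl.length)
    (hm : mt.getD k 0 ≤ -1) (ht : tl[k] = letter) :
    (pvAvail tl (mt.set k 0) c : Int) = (pvAvail tl mt c : Int) - (if c = letter then 1 else 0) := by
  have hkm : k < mt.length := pvGetD_lt mt k hm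
  have hkz : k < (tl.zip mt).length := by simp [List.length_zip]; omega
  have hz : tl.zip (mt.set k 0) = (tl.zip mt).set k (tl[k], (0 : Int)) := by
    apply List.ext_getElem
    · simp [List.length_zip]
    · intro i h1 h2
      simp only [List.getElem_zip, List.getElem_set]
      by_cases hik : k = i
      · subst hik; simp
      · simp [hik]
  have hmk : mt[k] ≤ -1 := by
    rw [List.getD_eq_getElem?_getD, List.getElem?_eq_getElem hkm] at hm
    simpa using hm
  have hpos : 0 < pvAvail tl mt c ∨ c ≠ letter := by
    by_cases hc : c = letter
    · left; subst hc; rw [← ht]; exact pvAvail_pos tl mt k hk hm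
    · right; exact hc
  unfold pvAvail at *
  rw [hz, List.countP_set hkz]
  have hget : (tl.zip mt)[k] = (tl[k], mt[k]) := List.getElem_zip
  rw [hget]
  by_cases hc : c = letter
  · subst hc
    rw [if_pos rfl]
    have h1 : ((tl[k] == c) && decide (mt[k] ≤ -1)) = true := by
      simp [ht, hmk]
    have h2 : ((tl[k] == c) && decide ((0 : Int) ≤ -1)) = false := by simp
    have hp : 0 < (tl.zip mt).countP (fun p => p.1 == c && decide (p.2 ≤ -1)) :=
      hpos.resolve_right (by simp)
    rw [h1, h2]
    simp
    omega
  · have h1 : ((tl[k] == c) && decide (mt[k] ≤ -1)) = false := by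
      simp [ht, Ne.symm hc]
    have h2 : ((tl[k] == c) && decide ((0 : Int) ≤ -1)) = false := by simp
    rw [if_neg hc, h1, h2]
    simp

lemma pvAvail_zero (tl : List Char) (mt : List Int) (letter : Char)
    (h : ∀ k, (hk : k < tl.length) → ¬(mt.getD k 0 ≤ -1 ∧ tl[k] = letter)) :
    pvAvail tl mt letter = 0 := by
  unfold pvAvail
  rw [List.countP_eq_zero]
  intro a ha
  rw [List.mem_iff_getElem] at ha
  obtain ⟨i, hi, rfl⟩ := ha
  have hit : i < tl.length := by simp [List.length_zip] at hi; omega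
  have him : i < mt.length := by simp [List.length_zip] at hi; omega
  have := h i hit
  rw [List.getElem_zip]
  simp only [Bool.and_eq_true, beq_iff_eq, decide_eq_true_eq]
  intro ⟨h1, h2⟩
  exact this ⟨by rw [List.getD_eq_getElem?_getD, List.getElem?_eq_getElem him]; simpa using h2, h1⟩

-- the main simulation: A's remaining outer loop (with processed prefix pre) against B's remaining result loop
lemma pvMain (tl : List Char) :
    ∀ (gs : List Char) (fbs pre mt : List Int) (d : PySem.Dict Char Int),
      gs.length = fbs.length →
      (∀ x ∈ fbs, x = 1 ∨ x = -1) →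
      (∀ c, d.getD c 0 = (pvAvail tl mt c : Int)) →
      ((PySem.List.enumerate gs (pre.length : Int)).foldl (aStep tl) (mt, pre ++ fbs)).2
        = pre ++ ((gs.zip fbs).foldl bStep (d, [])).2 := by
  intro gs
  induction gs with
  | nil =>
    intro fbs pre mt d hlen hval hd
    have : fbs = [] := List.eq_nil_of_length_eq_zero hlen.symm
    subst this
    simp [PySem.List.enumerate_nil]
  | cons g gs' ih =>
    intro fbs pre mt d hlen hval hd
    cases fbs with
    | nil => simp at hlen
    | cons f fbs' =>
      rw [PySem.List.enumerate_cons]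
      simp only [List.zip_cons_cons, List.foldl_cons]
      have hread : PySem.List.pyGetD (pre ++ f :: fbs') ((pre.length : Nat) : Int) 0 = f := by
        rw [PySem.List.pyGetD_natCast, List.getD_eq_getElem?_getD,
          List.getElem?_append_right (le_refl _)]
        simp
      have hf := hval f (by simp)
      have hlen' : gs'.length = fbs'.length := by simpa using hlen
      have hval' : ∀ x ∈ fbs', x = 1 ∨ x = -1 := fun x hx => hval x (by simp [hx])
      by_cases hf1 : f = 1
      · subst hf1
        have hA : aStep tl (mt, pre ++ 1 :: fbs') (((pre.length : Nat) : Int), g)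
            = (mt, pre ++ 1 :: fbs') := by
          simp only [aStep]
          rw [if_pos hread]
        have hB : bStep (d, []) (g, (1 : Int)) = (d, [(1 : Int)]) := by
          simp [bStep]
        rw [hA, hB]
        rw [show pre ++ (1 : Int) :: fbs' = (pre ++ [(1 : Int)]) ++ fbs' by simp]
        rw [show ((pre.length : Nat) : Int) + 1 = (((pre ++ [(1 : Int)]).length : Nat) : Int) by
          simp]
        rw [ih fbs' (pre ++ [(1 : Int)]) mt d hlen' hval' hd]
        rw [pvBfold_acc (gs'.zip fbs') d [(1 : Int)]]
        simp
      · have hfm1 : f = -1 := by rcases hf with h | h; exacts [absurd h hf1, h]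
        subst hfm1
        cases hInner : aInner g mt (PySem.List.enumerate tl) with
        | none =>
          have hzero : pvAvail tl mt g = 0 := by
            apply pvAvail_zero tl mt g
            intro k hk
            have := pvAInner_none g tl 0 mt (by simpa using hInner) k hk
            simpa using this
          have hA : aStep tl (mt, pre ++ (-1) :: fbs') (((pre.length : Nat) : Int), g)
              = (mt, pre ++ (-1) :: fbs') := by
            simp only [aStep]
            rw [if_neg (by rw [hread]; norm_num), hInner]
          have hng : ¬(d.getD g 0 > 0) := by rw [hd g, hzero]; simp
          have hB : bStep (d, []) (g, (-1 : Int)) = (d, [(-1 : Int)]) := by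
            simp [bStep, hng]
          rw [hA, hB]
          rw [show pre ++ (-1 : Int) :: fbs' = (pre ++ [(-1 : Int)]) ++ fbs' by simp]
          rw [show ((pre.length : Nat) : Int) + 1 = (((pre ++ [(-1 : Int)]).length : Nat) : Int) by
            simp]
          rw [ih fbs' (pre ++ [(-1 : Int)]) mt d hlen' hval' hd]
          rw [pvBfold_acc (gs'.zip fbs') d [(-1 : Int)]]
          simp
        | some j =>
          obtain ⟨k, hk, hj, hm, hcl⟩ := pvAInner_some g tl 0 mt j (by simpa using hInner)
          rw [Nat.zero_add] at hj hm
          have hpos := pvAvail_pos tl mt k hk hm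
          rw [hcl] at hpos
          have hA : aStep tl (mt, pre ++ (-1) :: fbs') (((pre.length : Nat) : Int), g)
              = (mt.set k 0, (pre ++ [(0 : Int)]) ++ fbs') := by
            simp only [aStep]
            rw [if_neg (by rw [hread]; norm_num), hInner, hj]
            simp only [PySem.List.pySetD_natCast]
            rw [List.set_append_right _ _ (le_refl _)]
            simp
          have hgt : d.getD g 0 > 0 := by rw [hd g]; exact_mod_cast hpos
          have hB : bStep (d, []) (g, (-1 : Int)) = (d.insert g (d.getD g 0 - 1), [(0 : Int)]) := by
            simp [bStep, hgt]
          rw [hA, hB]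
          have hd' : ∀ c, (d.insert g (d.getD g 0 - 1)).getD c 0 = (pvAvail tl (mt.set k 0) c : Int) := by
            intro c
            rw [PySem.Dict.getD_insert, pvAvail_set tl mt k g c hk hm hcl]
            by_cases hcg : c = g
            · rw [if_pos hcg, if_pos hcg, hd g, hcg]
            · rw [if_neg hcg, if_neg hcg, hd c]; ring
          rw [show ((pre.length : Nat) : Int) + 1 = (((pre ++ [(0 : Int)]).length : Nat) : Int) by
            simp]
          rw [ih fbs' (pre ++ [(0 : Int)]) (mt.set k 0) _ hlen' hval' hd']
          rw [pvBfold_acc (gs'.zip fbs') (d.insert g (d.getD g 0 - 1)) [(0 : Int)]]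
          simp

-- ===== VERDICT (by name: the statement is the Claim_ definition above) =====
theorem check_py_spec : Claim_equal_check_py := by
  intro target guess _ hpre
  have hle : guess.toList.length ≤ target.toList.length := hpre.1
  unfold Spec_check_py
  simp only [check_py, check_py_alt]
  rw [pvFb_eq target.toList guess.toList hle]
  have hent := pvEntries guess.toList target.toList
  have hiff := pvSumAll _ hent
  by_cases hall : ((guess.toList.zip target.toList).map
      (fun p => if p.1 = p.2 then (1 : Int) else (-1 : Int))).all (fun f => f == 1) = true
  · rw [if_pos (by rw [PySem.List.len_eq]; exact hiff.mpr hall), if_pos hall]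
  · rw [if_neg (by rw [PySem.List.len_eq]; intro hs; exact hall (hiff.mp hs)), if_neg hall]
    set fb := (guess.toList.zip target.toList).map
      (fun p => if p.1 = p.2 then (1 : Int) else (-1 : Int)) with hfbdef
    have hfbl : fb.length = guess.toList.length := by
      rw [hfbdef, List.length_map, List.length_zip]; omega
    have hd : ∀ c, ((target.toList.zip fb).foldl bCount PySem.Dict.empty).getD c 0
        = (pvAvail target.toList fb c : Int) := by
      intro c
      rw [pvBCount_spec]
      simp only [PySem.Dict.getD_empty]
      unfold pvAvail
      rw [List.countP_congr ?_]
      · ring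
      · intro p hp
        have hv : p.2 = 1 ∨ p.2 = -1 := by
          apply hent
          have := List.of_mem_zip (a := p.1) (b := p.2) (by simpa using hp)
          exact this.2
        rcases hv with h2 | h2 <;> simp [h2]
    have := pvMain target.toList guess.toList fb [] fb
      ((target.toList.zip fb).foldl bCount PySem.Dict.empty)
      (by omega) hent hd
    simpa using this
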